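-- pv_equiv track=rewrite | github.com/JoshuaZayne/fi-market-analysis | src/targeting/prioritization.py | assign_territories
-- ===== SOURCE A (Python) =====
-- from typing import Dict, List, Any, Optional
--
-- def assign_territories(
--
--     accounts: List[Dict],
--     territories: Dict[str, List[str]]
-- ) -> Dict[str, List[Dict]]:
--     """
--     Assign accounts to sales territories.
--
--     Args:
--         accounts: List of accounts
--         territories: Dict mapping territory name to regions
--
--     Returns:
--         Accounts grouped by territory
--     """
--     assignments = {t: [] for t in territories}
--     unassigned = []
--
--     for account in accounts:
--         region = account.get('region', 'Unknown')
--         assigned = False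
--
--         for territory, regions in territories.items():
--             if region in regions:
--                 assignments[territory].append(account)
--                 assigned = True
--                 break
--
--         if not assigned:
--             unassigned.append(account)
--
--     if unassigned:
--         assignments['Unassigned'] = unassigned
--
--     return assignments
-- ===== SOURCE B (Python) =====
-- def assign_territories(accounts, territories):
--     # Precompute region -> first territory containing it, then one lookup per account.
--     region_map = {}
--     for territory, regions in territories.items():
--         for r in regions:
--             region_map.setdefault(r, territory)
--
--     buckets = {t: [] for t in territories}
--     unassigned = []
--
--     for account in accounts:
--         t = region_map.get(account.get('region', 'Unknown'))
--         if t is None: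
--             unassigned.append(account)
--         else:
--             buckets[t].append(account)
--
--     if unassigned:
--         buckets['Unassigned'] = unassigned
--
--     return buckets
-- ===== Notes on version B (the rewrite author's own statement) =====
-- stated objective: faster
-- what changed: B precomputes a region-to-first-matching-territory dict once, then does a single lookup per account instead of scanning all territories' region lists for every account.
import Mathlib
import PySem

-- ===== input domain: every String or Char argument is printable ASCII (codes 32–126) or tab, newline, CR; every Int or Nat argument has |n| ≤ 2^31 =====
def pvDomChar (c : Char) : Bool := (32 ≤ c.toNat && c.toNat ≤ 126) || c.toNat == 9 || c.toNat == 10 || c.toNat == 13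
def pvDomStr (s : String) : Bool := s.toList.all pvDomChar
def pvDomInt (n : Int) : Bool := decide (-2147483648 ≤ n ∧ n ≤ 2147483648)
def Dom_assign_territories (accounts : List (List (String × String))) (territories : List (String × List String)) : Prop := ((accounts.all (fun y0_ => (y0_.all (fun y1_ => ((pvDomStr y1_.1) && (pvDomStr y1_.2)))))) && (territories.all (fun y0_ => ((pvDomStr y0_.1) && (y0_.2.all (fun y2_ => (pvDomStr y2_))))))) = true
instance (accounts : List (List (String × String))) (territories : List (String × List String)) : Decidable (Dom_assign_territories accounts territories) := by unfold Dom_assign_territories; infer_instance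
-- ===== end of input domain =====

-- B replaces A's per-account scan over all territories by a region→territory dict built once and one lookup per account.

-- ===== PORT A =====
-- inner 'for territory, regions in territories.items(): if region in regions: append; break'
def pvAssignScan (account : List (String × String)) (region : String)
    : List (String × List String) → PySem.Dict String (List (List (String × String)))
    → PySem.Dict String (List (List (String × String))) × Bool
  | [], asg => (asg, false)
  | (t, rs) :: rest, asg =>
      if rs.contains region then (asg.modify t [] (· ++ [account]), true)
      else pvAssignScan account region rest asg

def assign_territories (accounts : List (List (String × String))) (territories : List (String × List String)) : List (String × List (List (String × String))) :=
  let td := PySem.Dict.ofList territories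
  let assignments0 : PySem.Dict String (List (List (String × String))) :=
    td.keys.foldl (fun d t => d.insert t []) PySem.Dict.empty
  let st := accounts.foldl (fun (st : PySem.Dict String (List (List (String × String))) × List (List (String × String))) account =>
      let region := (PySem.Dict.ofList account).getD "region" "Unknown"
      let r := pvAssignScan account region td.items st.1
      if r.2 then (r.1, st.2) else (r.1, st.2 ++ [account]))
    (assignments0, [])
  let assignments := if st.2.isEmpty then st.1 else st.1.insert "Unassigned" st.2
  assignments.items

-- ===== PORT B =====
def assign_territories_alt (accounts : List (List (String × String))) (territories : List (String × List String)) : List (String × List (List (String × String))) :=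
  let td := PySem.Dict.ofList territories
  let regionMap : PySem.Dict String String :=
    td.items.foldl (fun m p => p.2.foldl (fun m r => m.setdefault r p.1) m) PySem.Dict.empty
  let buckets0 : PySem.Dict String (List (List (String × String))) :=
    td.keys.foldl (fun d t => d.insert t []) PySem.Dict.empty
  let st := accounts.foldl (fun (st : PySem.Dict String (List (List (String × String))) × List (List (String × String))) account =>
      match regionMap.get? ((PySem.Dict.ofList account).getD "region" "Unknown") with
      | none => (st.1, st.2 ++ [account])
      | some t => (st.1.modify t [] (· ++ [account]), st.2))
    (buckets0, [])
  let buckets := if st.2.isEmpty then st.1 else st.1.insert "Unassigned" st.2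
  buckets.items

-- ===== PRECONDITION & SPEC =====
def Spec_assign_territories (accounts : List (List (String × String))) (territories : List (String × List String)) (out : List (String × List (List (String × String)))) : Prop := out = assign_territories_alt accounts territories
instance (accounts : List (List (String × String))) (territories : List (String × List String)) (out : List (String × List (List (String × String)))) : Decidable (Spec_assign_territories accounts territories out) := by unfold Spec_assign_territories; infer_instance

-- ===== CLAIM (what is proved, stated in full; the proofs are below) =====
def Claim_equal_assign_territories : Prop := ∀ (accounts : List (List (String × String))) (territories : List (String × List String)), Dom_assign_territories accounts territories → Spec_assign_territories accounts territories (assign_territories accounts territories)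

-- ===== LEMMAS AND PROOFS =====

-- B's inner setdefault loop: lookup = old lookup, else first membership hit
lemma get?_setdefault_fold (rs : List String) (t : String) (m : PySem.Dict String String) (x : String) :
    (rs.foldl (fun m r => m.setdefault r t) m).get? x
      = (m.get? x).or (if rs.contains x then some t else none) := by
  induction rs generalizing m with
  | nil => simp
  | cons r rs ih =>
    simp only [List.foldl_cons, ih]
    by_cases hc : m.contains r = true
    · rw [PySem.Dict.setdefault_of_contains _ _ hc]
      by_cases hx : x = r
      · subst hx
        rw [PySem.Dict.contains_eq_isSome_get?] at hc
        obtain ⟨v, hv⟩ := Option.isSome_iff_exists.mp hc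
        simp [hv]
      · simp [hx]
    · rw [PySem.Dict.setdefault_of_not_contains _ _ (by simpa using hc)]
      by_cases hx : x = r
      · subst hx
        have hn : m.get? x = none := by
          rw [PySem.Dict.contains_eq_isSome_get?] at hc
          simpa using hc
        simp [hn]
      · rw [PySem.Dict.get?_insert]
        simp [hx]

-- B's regionMap lookup = first territory whose region list contains x
lemma get?_regionMap (L : List (String × List String)) (m : PySem.Dict String String) (x : String) :
    (L.foldl (fun m p => p.2.foldl (fun m r => m.setdefault r p.1) m) m).get? x
      = (m.get? x).or ((L.find? (fun p => p.2.contains x)).map (·.1)) := by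
  induction L generalizing m with
  | nil => simp
  | cons p L ih =>
    simp only [List.foldl_cons, ih, get?_setdefault_fold]
    rw [Option.or_assoc]
    by_cases hx : x ∈ p.2 <;> simp [hx]

-- A's scan-with-break in terms of find?
lemma pvAssignScan_eq (account : List (String × String)) (region : String)
    (L : List (String × List String)) (asg : PySem.Dict String (List (List (String × String)))) :
    pvAssignScan account region L asg
      = match (L.find? (fun p => p.2.contains region)).map (·.1) with
        | none => (asg, false)
        | some t => (asg.modify t [] (· ++ [account]), true) := by
  induction L with
  | nil => simp [pvAssignScan]
  | cons p L ih =>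
    obtain ⟨t, rs⟩ := p
    by_cases h : region ∈ rs
    · simp [pvAssignScan, h]
    · simp only [pvAssignScan, List.contains_eq_mem, h, decide_false, Bool.false_eq_true,
        if_false, ih]
      simp [h]

-- the two per-account fold steps agree from any state
lemma step_eq (territories : List (String × List String))
    (st : PySem.Dict String (List (List (String × String))) × List (List (String × String)))
    (account : List (String × String)) :
    (let region := (PySem.Dict.ofList account).getD "region" "Unknown"
     let r := pvAssignScan account region (PySem.Dict.ofList territories).items st.1
     if r.2 then (r.1, st.2) else (r.1, st.2 ++ [account]))
    = (match ((PySem.Dict.ofList territories).items.foldl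
            (fun m p => p.2.foldl (fun m r => m.setdefault r p.1) m)
            (PySem.Dict.empty : PySem.Dict String String)).get?
            ((PySem.Dict.ofList account).getD "region" "Unknown") with
       | none => (st.1, st.2 ++ [account])
       | some t => (st.1.modify t [] (· ++ [account]), st.2)) := by
  simp only [get?_regionMap, pvAssignScan_eq, PySem.Dict.get?_empty, Option.none_or]
  cases h : ((PySem.Dict.ofList territories).items.find?
      (fun p => p.2.contains ((PySem.Dict.ofList account).getD "region" "Unknown"))).map (·.1) <;>
    simp

lemma foldl_step_eq (territories : List (String × List String))
    (accounts : List (List (String × String)))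
    (st : PySem.Dict String (List (List (String × String))) × List (List (String × String))) :
    accounts.foldl (fun st account =>
      let region := (PySem.Dict.ofList account).getD "region" "Unknown"
      let r := pvAssignScan account region (PySem.Dict.ofList territories).items st.1
      if r.2 then (r.1, st.2) else (r.1, st.2 ++ [account])) st
    = accounts.foldl (fun st account =>
      match ((PySem.Dict.ofList territories).items.foldl
          (fun m p => p.2.foldl (fun m r => m.setdefault r p.1) m)
          (PySem.Dict.empty : PySem.Dict String String)).get?
          ((PySem.Dict.ofList account).getD "region" "Unknown") with
      | none => (st.1, st.2 ++ [account])
      | some t => (st.1.modify t [] (· ++ [account]), st.2)) st := by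
  induction accounts generalizing st with
  | nil => rfl
  | cons a l ih => rw [List.foldl_cons, List.foldl_cons, step_eq, ih]

-- ===== VERDICT (by name: the statement is the Claim_ definition above) =====
theorem assign_territories_spec : Claim_equal_assign_territories := by
  intro accounts territories _
  unfold Spec_assign_territories assign_territories assign_territories_alt
  simp only [foldl_step_eq]
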